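-- pv_equiv track=rewrite | github.com/duduzgomes/funcoes-uteis | obterDados.py | quadratico
-- ===== SOURCE A (Python) =====
-- def  quadratico(x,y):
--     n = len(x)
--     sx = 0
--     sy = 0
--     sx2 = 0
--     sx3 = 0
--     sx4 = 0
--     sxy = 0
--     sx2y = 0
--     x2 = []
--     x3 = []
--     x4 = []
--     xy = []
--     x2y = []
--
--     for i in range(n):
--         x2.append(x[i] * x[i])
--         x3.append(x[i] * x[i] * x[i])
--         x4.append(x[i] * x[i] * x[i] * x[i])
--         x2y.append(x2[i] * y[i])
--         xy.append(x[i] * y[i])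
--         sx2 += x2[i]
--         sx3 += x3[i]
--         sx4 += x4[i]
--         sx += x[i]
--         sy += y[i]
--         sxy += xy[i]
--         sx2y += x2y[i]
--
--     array1 = [[n,sx, sx2],
--              [sx,sx2, sx3],
--              [sx2,sx3,sx4]]
--
--     array2 = [sy, sxy, sx2y]
--
--     return array1, array2
-- ===== SOURCE B (Python) =====
-- def quadratico(x, y):
--     # Hash aggregation: count multiplicities of distinct (x,y) pairs, then sum each
--     # aggregate once per distinct pair, weighted by its multiplicity.
--     counts = {}
--     for p in zip(x, y):
--         counts[p] = counts.get(p, 0) + 1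
--     n = 0
--     sx = 0
--     sy = 0
--     sx2 = 0
--     sx3 = 0
--     sx4 = 0
--     sxy = 0
--     sx2y = 0
--     for (xv, yv), m in counts.items():
--         n += m
--         sx += m * xv
--         sy += m * yv
--         sx2 += m * (xv * xv)
--         sx3 += m * (xv * xv * xv)
--         sx4 += m * (xv * xv * xv * xv)
--         sxy += m * (xv * yv)
--         sx2y += m * (xv * xv * yv)
--     array1 = [[n, sx, sx2],
--               [sx, sx2, sx3],
--               [sx2, sx3, sx4]]
--     array2 = [sy, sxy, sx2y]
--     return array1, array2
-- ===== Notes on version B (the rewrite author's own statement) =====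
-- stated objective: alternative
-- what changed: Replaces A's per-element fused loop (twelve accumulators plus five intermediate lists) with hash aggregation: a dict counts multiplicities of distinct (x,y) pairs, and each aggregate is summed once per distinct pair weighted by its multiplicity.
import Mathlib
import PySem

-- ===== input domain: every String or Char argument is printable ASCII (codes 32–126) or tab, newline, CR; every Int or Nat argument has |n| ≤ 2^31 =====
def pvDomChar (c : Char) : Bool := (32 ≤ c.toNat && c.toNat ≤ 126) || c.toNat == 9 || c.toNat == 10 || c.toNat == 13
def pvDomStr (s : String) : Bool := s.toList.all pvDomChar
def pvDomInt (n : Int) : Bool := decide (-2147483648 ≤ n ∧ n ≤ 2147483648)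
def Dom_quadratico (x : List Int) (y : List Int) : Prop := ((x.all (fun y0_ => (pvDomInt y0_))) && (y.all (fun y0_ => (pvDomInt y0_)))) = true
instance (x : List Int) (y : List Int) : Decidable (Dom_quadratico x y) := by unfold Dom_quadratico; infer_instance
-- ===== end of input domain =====

-- B replaces A's fused per-element loop with hash aggregation over distinct (x,y) pairs
-- (a multiplicity dict, then one weighted sum per distinct pair); objective: alternative.
-- Pre_ excludes y shorter than x, where Python A raises IndexError.


-- ===== PORT A =====
-- Loop state of A: seven accumulators and the five intermediate lists, in the order they appear.
structure QState where
  sx : Int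
  sy : Int
  sx2 : Int
  sx3 : Int
  sx4 : Int
  sxy : Int
  sx2y : Int
  x2 : List Int
  x3 : List Int
  x4 : List Int
  xy : List Int
  x2y : List Int
  deriving Repr, DecidableEq

-- One iteration of A's for-loop (i in range(n)); x[i]/y[i] is x.getD i 0 since every
-- index A reads inside Pre_ is in range (Python would raise on a shorter y; Pre_ excludes that).
def qstep (x : List Int) (y : List Int) (s : QState) (i : Nat) : QState :=
  let xi := x.getD i 0
  let yi := y.getD i 0
  let x2' := s.x2 ++ [xi * xi]
  let x3' := s.x3 ++ [xi * xi * xi]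
  let x4' := s.x4 ++ [xi * xi * xi * xi]
  let x2y' := s.x2y ++ [x2'.getD i 0 * yi]
  let xy' := s.xy ++ [xi * yi]
  { sx2 := s.sx2 + x2'.getD i 0
    sx3 := s.sx3 + x3'.getD i 0
    sx4 := s.sx4 + x4'.getD i 0
    sx := s.sx + xi
    sy := s.sy + yi
    sxy := s.sxy + xy'.getD i 0
    sx2y := s.sx2y + x2y'.getD i 0
    x2 := x2', x3 := x3', x4 := x4', xy := xy', x2y := x2y' }

def quadratico (x : List Int) (y : List Int) : List (List Int) × List Int :=
  let n := x.length
  let s := (List.range n).foldl (qstep x y)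
    { sx := 0, sy := 0, sx2 := 0, sx3 := 0, sx4 := 0, sxy := 0, sx2y := 0
      x2 := [], x3 := [], x4 := [], xy := [], x2y := [] }
  ([[(n : Int), s.sx, s.sx2], [s.sx, s.sx2, s.sx3], [s.sx2, s.sx3, s.sx4]],
   [s.sy, s.sxy, s.sx2y])

-- ===== PORT B =====
-- B's second loop state: count of pairs seen and the seven weighted sums.
structure BState where
  n : Int
  sx : Int
  sy : Int
  sx2 : Int
  sx3 : Int
  sx4 : Int
  sxy : Int
  sx2y : Int
  deriving Repr, DecidableEq

-- One iteration of B's 'for (xv, yv), m in counts.items()' loop.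
def bstep (s : BState) (p : (Int × Int) × Int) : BState :=
  let xv := p.1.1
  let yv := p.1.2
  let m := p.2
  { n := s.n + m
    sx := s.sx + m * xv
    sy := s.sy + m * yv
    sx2 := s.sx2 + m * (xv * xv)
    sx3 := s.sx3 + m * (xv * xv * xv)
    sx4 := s.sx4 + m * (xv * xv * xv * xv)
    sxy := s.sxy + m * (xv * yv)
    sx2y := s.sx2y + m * (xv * xv * yv) }

def quadratico_alt (x : List Int) (y : List Int) : List (List Int) × List Int :=
  -- counts = {}; for p in zip(x, y): counts[p] = counts.get(p, 0) + 1
  let counts := (x.zip y).foldl (fun d p => d.insert p (d.getD p 0 + 1))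
      (PySem.Dict.empty : PySem.Dict (Int × Int) Int)
  let s := counts.items.foldl bstep
    { n := 0, sx := 0, sy := 0, sx2 := 0, sx3 := 0, sx4 := 0, sxy := 0, sx2y := 0 }
  ([[s.n, s.sx, s.sx2], [s.sx, s.sx2, s.sx3], [s.sx2, s.sx3, s.sx4]],
   [s.sy, s.sxy, s.sx2y])

-- ===== PRECONDITION & SPEC =====
-- Pre_ excludes y shorter than x, on which Python A raises IndexError (y[i] out of range).
def Pre_quadratico (x : List Int) (y : List Int) : Prop := x.length ≤ y.length
instance (x : List Int) (y : List Int) : Decidable (Pre_quadratico x y) := by unfold Pre_quadratico; infer_instance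
def pvWitness_quadratico : List Int × List Int := ([1, 2, 3], [4, 5, 6])

def Spec_quadratico (x : List Int) (y : List Int) (out : List (List Int) × List Int) : Prop := out = quadratico_alt x y
instance (x : List Int) (y : List Int) (out : List (List Int) × List Int) : Decidable (Spec_quadratico x y out) := by unfold Spec_quadratico; infer_instance

-- ===== CLAIM (what is proved, stated in full; the proofs are below) =====
def Claim_equal_quadratico : Prop := ∀ (x : List Int) (y : List Int), Dom_quadratico x y → Pre_quadratico x y → Spec_quadratico x y (quadratico x y)

-- ===== LEMMAS AND PROOFS =====

-- sum(f(i) for i in range(n)) — abbreviation used by the lemmas only.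
def qsum (n : Nat) (f : Nat → Int) : Int := ((List.range n).map f).sum

-- Invariant of A's loop: after n iterations the accumulators are the seven index sums
-- over range n, and the intermediate lists are the corresponding maps.
theorem qloop_inv (x y : List Int) (n : Nat) :
    (List.range n).foldl (qstep x y)
      { sx := 0, sy := 0, sx2 := 0, sx3 := 0, sx4 := 0, sxy := 0, sx2y := 0
        x2 := [], x3 := [], x4 := [], xy := [], x2y := [] } =
    { sx := qsum n (fun i => x.getD i 0)
      sy := qsum n (fun i => y.getD i 0)
      sx2 := qsum n (fun i => x.getD i 0 * x.getD i 0)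
      sx3 := qsum n (fun i => x.getD i 0 * x.getD i 0 * x.getD i 0)
      sx4 := qsum n (fun i => x.getD i 0 * x.getD i 0 * x.getD i 0 * x.getD i 0)
      sxy := qsum n (fun i => x.getD i 0 * y.getD i 0)
      sx2y := qsum n (fun i => x.getD i 0 * x.getD i 0 * y.getD i 0)
      x2 := (List.range n).map (fun i => x.getD i 0 * x.getD i 0)
      x3 := (List.range n).map (fun i => x.getD i 0 * x.getD i 0 * x.getD i 0)
      x4 := (List.range n).map (fun i => x.getD i 0 * x.getD i 0 * x.getD i 0 * x.getD i 0)
      xy := (List.range n).map (fun i => x.getD i 0 * y.getD i 0)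
      x2y := (List.range n).map (fun i => x.getD i 0 * x.getD i 0 * y.getD i 0) } := by
  induction n with
  | zero => simp [qsum]
  | succ n ih =>
      rw [List.range_succ, List.foldl_append, ih]
      simp only [List.foldl_cons, List.foldl_nil, qstep]
      simp [qsum, List.range_succ]

-- Invariant of B's second loop: field-wise weighted sums over the items list.
theorem bfold_inv (l : List ((Int × Int) × Int)) (s : BState) :
    l.foldl bstep s =
    { n := s.n + (l.map (fun p => p.2)).sum
      sx := s.sx + (l.map (fun p => p.2 * p.1.1)).sum
      sy := s.sy + (l.map (fun p => p.2 * p.1.2)).sum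
      sx2 := s.sx2 + (l.map (fun p => p.2 * (p.1.1 * p.1.1))).sum
      sx3 := s.sx3 + (l.map (fun p => p.2 * (p.1.1 * p.1.1 * p.1.1))).sum
      sx4 := s.sx4 + (l.map (fun p => p.2 * (p.1.1 * p.1.1 * p.1.1 * p.1.1))).sum
      sxy := s.sxy + (l.map (fun p => p.2 * (p.1.1 * p.1.2))).sum
      sx2y := s.sx2y + (l.map (fun p => p.2 * (p.1.1 * p.1.1 * p.1.2))).sum } := by
  induction l generalizing s with
  | nil => simp
  | cons a t ih =>
      rw [List.foldl_cons, ih]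
      simp only [bstep, List.map_cons, List.sum_cons, BState.mk.injEq]
      refine ⟨by ring, by ring, by ring, by ring, by ring, by ring, by ring, by ring⟩

-- Summing a weighted term once per distinct element equals summing it per occurrence.
theorem sum_count_mul_deq {α : Type} [DecidableEq α] (l : List α) (f : α → Int) :
    ((PySem.Set.ofList l).map (fun k => (l.count k : Int) * f k)).sum = (l.map f).sum := by
  have hfin : (PySem.Set.ofList l).toFinset = l.toFinset := by
    ext a
    simp [List.mem_toFinset, PySem.Set.mem_ofList]
  calc ((PySem.Set.ofList l).map (fun k => (l.count k : Int) * f k)).sum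
      = ∑ m ∈ l.toFinset, (l.count m : Int) * f m := by
        rw [← List.sum_toFinset _ (PySem.Set.nodup_ofList l), hfin]
    _ = (l.map f).sum := by
        rw [Finset.sum_list_map_count]
        simp

-- Summing a weighted term once per distinct element equals summing it per occurrence.
theorem sum_count_mul {α : Type} [inst : BEq α] [LawfulBEq α] (l : List α) (f : α → Int) :
    ((PySem.Set.ofList l).map (fun k => (l.count k : Int) * f k)).sum = (l.map f).sum := by
  letI instD : DecidableEq α := fun a b => decidable_of_iff ((a == b) = true) beq_iff_eq
  rw [show inst = @instBEqOfDecidableEq α instD from lawful_beq_subsingleton _ _]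
  exact sum_count_mul_deq l f

-- Sum over zipped pairs = index sum over range(len x), when y is at least as long.
theorem zip_sum_eq_qsum (x : List Int) (f : Int → Int → Int) :
    ∀ (y : List Int), x.length ≤ y.length →
    ((x.zip y).map (fun p => f p.1 p.2)).sum = qsum x.length (fun i => f (x.getD i 0) (y.getD i 0)) := by
  induction x with
  | nil => intro y _; simp [qsum]
  | cons a t ih =>
      intro y hy
      cases y with
      | nil => simp at hy
      | cons b u =>
          simp only [List.zip_cons_cons, List.map_cons, List.sum_cons, List.length_cons]
          have hr : qsum (t.length + 1) (fun i => f ((a :: t).getD i 0) ((b :: u).getD i 0))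
              = f a b + qsum t.length (fun i => f (t.getD i 0) (u.getD i 0)) := by
            simp [qsum, List.range_succ_eq_map, List.map_map, Function.comp_def]
          rw [hr, ih u (by simpa using hy)]

theorem qsum_one (n : Nat) : qsum n (fun _ => (1 : Int)) = n := by
  simp [qsum, List.map_const']

-- ===== VERDICT (by name: the statement is the Claim_ definition above) =====
theorem quadratico_spec : Claim_equal_quadratico := by
  intro x y _ hpre
  show quadratico x y = quadratico_alt x y
  have hlen : x.length ≤ y.length := hpre
  simp only [quadratico, quadratico_alt, qloop_inv,
    PySem.Dict.foldl_insert_getD_add_one_eq_counter, PySem.Dict.items_counter,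
    bfold_inv, List.map_map, zero_add]
  have hcnt : ∀ (g : Int × Int → Int),
      (((PySem.Set.ofList (x.zip y)).map (fun k => (((x.zip y).count k : Int)) * g k))).sum
        = ((x.zip y).map g).sum := fun g => sum_count_mul (x.zip y) g
  simp only [Function.comp_def]
  rw [show ((PySem.Set.ofList (x.zip y)).map fun k => ((x.zip y).count k : Int)) =
      ((PySem.Set.ofList (x.zip y)).map fun k => ((x.zip y).count k : Int) * (fun _ => (1:Int)) k) by
        simp]
  rw [hcnt (fun _ => 1), hcnt (fun p => p.1), hcnt (fun p => p.2),
      hcnt (fun p => p.1 * p.1), hcnt (fun p => p.1 * p.1 * p.1),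
      hcnt (fun p => p.1 * p.1 * p.1 * p.1), hcnt (fun p => p.1 * p.2),
      hcnt (fun p => p.1 * p.1 * p.2)]
  rw [zip_sum_eq_qsum x (fun _ _ => 1) y hlen, zip_sum_eq_qsum x (fun a _ => a) y hlen,
      zip_sum_eq_qsum x (fun _ b => b) y hlen, zip_sum_eq_qsum x (fun a _ => a * a) y hlen,
      zip_sum_eq_qsum x (fun a _ => a * a * a) y hlen,
      zip_sum_eq_qsum x (fun a _ => a * a * a * a) y hlen,
      zip_sum_eq_qsum x (fun a b => a * b) y hlen,
      zip_sum_eq_qsum x (fun a b => a * a * b) y hlen, qsum_one]
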